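-- pv_equiv track=rewrite | github.com/thisAbdU/A2SV-contest-Exercises | A_Shalamagando_s_workout.py | workout
-- ===== SOURCE A (Python) =====
-- def workout(arr):
--     c_b_back = [0, 0, 0]
--
--     for i in range(len(arr)):
--         c_b_back[i%3] += arr[i]
--
--     max_ = c_b_back.index(max(c_b_back))
--
--     if max_ == 0:
--         return "chest"
--     elif max_ == 1:
--         return "biceps"
--     else:
--         return "back"
-- ===== SOURCE B (Python) =====
-- def workout(arr):
--     s0 = s1 = s2 = 0
--     for i in range(0, len(arr), 3):
--         chunk = arr[i:i + 3]
--         s0 += chunk[0]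
--         if len(chunk) > 1:
--             s1 += chunk[1]
--         if len(chunk) > 2:
--             s2 += chunk[2]
--     if s0 >= s1 and s0 >= s2:
--         return "chest"
--     if s1 >= s2:
--         return "biceps"
--     return "back"
-- ===== Notes on version B (the rewrite author's own statement) =====
-- stated objective: alternative
-- what changed: Replaces the per-element modulo-dispatch loop plus max()/index() lookup with a chunked traversal (one iteration per 3-element slice, three plain accumulators) and a direct comparison chain that encodes the first-maximum tie-break.
import Mathlib
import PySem

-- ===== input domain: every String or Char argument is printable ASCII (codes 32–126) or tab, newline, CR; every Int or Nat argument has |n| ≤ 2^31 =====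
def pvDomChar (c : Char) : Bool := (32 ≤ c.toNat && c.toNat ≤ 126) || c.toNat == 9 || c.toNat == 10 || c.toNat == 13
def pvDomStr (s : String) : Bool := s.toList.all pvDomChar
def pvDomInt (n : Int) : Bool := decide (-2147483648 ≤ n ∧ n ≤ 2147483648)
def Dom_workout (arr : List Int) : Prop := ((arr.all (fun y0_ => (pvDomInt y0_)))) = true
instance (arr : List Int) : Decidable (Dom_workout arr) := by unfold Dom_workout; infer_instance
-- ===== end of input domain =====

-- B replaces A's per-element modulo-dispatch loop + max()/index() with a chunk-of-3 traversal and a comparison chain (objective: alternative decomposition, same cost).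

-- ===== PORT A =====
-- 'for i in range(len(arr)): c_b_back[i%3] += arr[i]' as structural recursion over arr
-- carrying the index i; arr[i] is the current element x, c_b_back[i%3] via pyGetD/pySetD.
def workoutLoop : List Int → Int → List Int → List Int
  | c, _, [] => c
  | c, i, x :: xs =>
    workoutLoop (PySem.List.pySetD c (PySem.Int.mod i 3)
      (PySem.List.pyGetD c (PySem.Int.mod i 3) 0 + x)) (i + 1) xs

def workout (arr : List Int) : String :=
  let cbb := workoutLoop [0, 0, 0] 0 arr
  let mx := (PySem.List.max? cbb (fun y => y)).getD 0          -- max(c_b_back); list is nonempty, getD never used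
  let max_ := (PySem.List.index? cbb mx).getD 0                -- c_b_back.index(...); the max is a member, getD never used
  if max_ = 0 then "chest"
  else if max_ = 1 then "biceps"
  else "back"

-- ===== PORT B =====
-- 'for i in range(0, len(arr), 3): chunk = arr[i:i+3]; ...' as structural recursion
-- that drops 3 elements per step (the loop visits exactly the suffixes arr[i:]).
def workoutSums (xs : List Int) (s0 s1 s2 : Int) : Int × Int × Int :=
  match xs with
  | [] => (s0, s1, s2)
  | x :: t =>
    let chunk := (x :: t).take 3
    workoutSums (t.drop 2) (s0 + chunk.getD 0 0)
      (s1 + if 1 < chunk.length then chunk.getD 1 0 else 0)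
      (s2 + if 2 < chunk.length then chunk.getD 2 0 else 0)
termination_by xs.length
decreasing_by simp

def workout_alt (arr : List Int) : String :=
  let s := workoutSums arr 0 0 0
  if s.2.1 ≤ s.1 ∧ s.2.2 ≤ s.1 then "chest"
  else if s.2.2 ≤ s.2.1 then "biceps"
  else "back"

-- ===== PRECONDITION & SPEC =====
def Spec_workout (arr : List Int) (out : String) : Prop := out = workout_alt arr
instance (arr : List Int) (out : String) : Decidable (Spec_workout arr out) := by unfold Spec_workout; infer_instance

-- ===== CLAIM (what is proved, stated in full; the proofs are below) =====
def Claim_equal_workout : Prop := ∀ (arr : List Int), Dom_workout arr → Spec_workout arr (workout arr)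

-- ===== LEMMAS AND PROOFS =====

-- pure three-bucket sums, proof-side only
def S3 : List Int → Int × Int × Int
  | [] => (0, 0, 0)
  | [x] => (x, 0, 0)
  | [x, y] => (x, y, 0)
  | x :: y :: z :: r => ((S3 r).1 + x, (S3 r).2.1 + y, (S3 r).2.2 + z)

lemma workoutSums_eq_S3 (xs : List Int) : ∀ s0 s1 s2,
    workoutSums xs s0 s1 s2 = (s0 + (S3 xs).1, s1 + (S3 xs).2.1, s2 + (S3 xs).2.2) := by
  induction xs using S3.induct with
  | case1 => intro s0 s1 s2; rw [workoutSums.eq_def]; simp [S3]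
  | case2 x =>
    intro s0 s1 s2
    rw [workoutSums.eq_def]; simp only []
    rw [workoutSums.eq_def]; simp [S3]
  | case3 x y =>
    intro s0 s1 s2
    rw [workoutSums.eq_def]; simp only []
    rw [workoutSums.eq_def]; simp [S3]
  | case4 x y z r ih =>
    intro s0 s1 s2
    rw [workoutSums.eq_def]
    simp [ih, S3]
    omega

lemma workoutLoop_char (xs : List Int) : ∀ (a b c i : Int), 0 ≤ i → i % 3 = 0 →
    workoutLoop [a, b, c] i xs = [a + (S3 xs).1, b + (S3 xs).2.1, c + (S3 xs).2.2] := by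
  induction xs using S3.induct with
  | case1 => intro a b c i h0 h3; simp [workoutLoop, S3]
  | case2 x =>
    intro a b c i h0 h3
    simp [workoutLoop, h3, S3, PySem.List.pySetD, PySem.List.pySet?,
      PySem.List.pyIdx?, PySem.List.pyGetD, PySem.List.pyGet?]
  | case3 x y =>
    intro a b c i h0 h3
    have h1 : (i + 1) % 3 = 1 := by omega
    simp [workoutLoop, h3, h1, S3, PySem.List.pySetD, PySem.List.pySet?,
      PySem.List.pyIdx?, PySem.List.pyGetD, PySem.List.pyGet?]
  | case4 x y z r ih =>
    intro a b c i h0 h3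
    have h1 : (i + 1) % 3 = 1 := by omega
    have h2 : (i + 1 + 1) % 3 = 2 := by omega
    have h4 : (i + 1 + 1 + 1) % 3 = 0 := by omega
    simp [workoutLoop, h3, h1, h2, PySem.List.pySetD, PySem.List.pySet?,
      PySem.List.pyIdx?, PySem.List.pyGetD, PySem.List.pyGet?]
    rw [ih (a + x) (b + y) (c + z) (i + 1 + 1 + 1) (by omega) h4]
    simp [S3]; omega

-- selecting the muscle name: A's max()/index()/if-chain equals B's comparison chain
lemma finish_eq (a b c : Int) :
    (if (PySem.List.index? [a, b, c]
          ((PySem.List.max? [a, b, c] (fun y => y)).getD 0)).getD 0 = 0 then "chest"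
     else if (PySem.List.index? [a, b, c]
          ((PySem.List.max? [a, b, c] (fun y => y)).getD 0)).getD 0 = 1 then "biceps"
     else "back")
    = (if b ≤ a ∧ c ≤ a then "chest" else if c ≤ b then "biceps" else "back") := by
  by_cases h1 : a < b
  · by_cases h2 : b < c
    · have e : PySem.List.index? [a, b, c] c = some 2 := by
        rw [PySem.List.index?_cons_of_ne _ (by omega : a ≠ c),
            PySem.List.index?_cons_of_ne _ (by omega : b ≠ c),
            PySem.List.index?_cons_self]
        rfl
      simp only [PySem.List.index?_eq_idxOf?] at e
      have hba : ¬ (b ≤ a ∧ c ≤ a) := by omega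
      have hcb : ¬ (c ≤ b) := by omega
      simp [PySem.List.max?, List.foldl, h1, h2, e, hba, hcb]
    · have e : PySem.List.index? [a, b, c] b = some 1 := by
        rw [PySem.List.index?_cons_of_ne _ (by omega : a ≠ b),
            PySem.List.index?_cons_self]
        rfl
      simp only [PySem.List.index?_eq_idxOf?] at e
      have hba : ¬ (b ≤ a ∧ c ≤ a) := by omega
      have hcb : c ≤ b := by omega
      simp [PySem.List.max?, List.foldl, h1, h2, e, hba, hcb]
  · by_cases h2 : a < c
    · have e : PySem.List.index? [a, b, c] c = some 2 := by
        rw [PySem.List.index?_cons_of_ne _ (by omega : a ≠ c),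
            PySem.List.index?_cons_of_ne _ (by omega : b ≠ c),
            PySem.List.index?_cons_self]
        rfl
      simp only [PySem.List.index?_eq_idxOf?] at e
      have hba : ¬ (b ≤ a ∧ c ≤ a) := by omega
      have hcb : ¬ (c ≤ b) := by omega
      simp [PySem.List.max?, List.foldl, h1, h2, e, hba, hcb]
    · have e : PySem.List.index? [a, b, c] a = some 0 :=
        PySem.List.index?_cons_self a [b, c]
      simp only [PySem.List.index?_eq_idxOf?] at e
      have hba : b ≤ a ∧ c ≤ a := by omega
      simp [PySem.List.max?, List.foldl, h1, h2, e, hba]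

-- ===== VERDICT (by name: the statement is the Claim_ definition above) =====
theorem workout_spec : Claim_equal_workout := by
  intro arr _
  unfold Spec_workout workout workout_alt
  rw [workoutLoop_char arr 0 0 0 0 (by omega) (by decide), workoutSums_eq_S3]
  simpa using finish_eq (S3 arr).1 (S3 arr).2.1 (S3 arr).2.2
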